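-- pv_equiv track=rewrite | github.com/JeanPhilipLalumiere/MCGT | tools/prune_manifest_paths.py | norm_manifest
-- ===== SOURCE A (Python) =====
-- def norm_manifest(obj: dict) -> dict:
--     files = obj.get("files", [])
--     norm = []
--     for it in files:
--         if not isinstance(it, dict):
--             continue
--         p = str(it.get("path", "")).strip()
--         if p:
--             norm.append({"path": p})
--     # dédoublonnage + tri
--     seen = set()
--     uniq = []
--     for it in norm:
--         if it["path"] not in seen:
--             seen.add(it["path"])
--             uniq.append(it)
--     uniq.sort(key=lambda x: x["path"])
--     return {"files": uniq}
-- ===== SOURCE B (Python) =====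
-- def norm_manifest(obj: dict) -> dict:
--     # one filtering pass gathering plain path strings
--     paths = []
--     for it in obj.get("files", []):
--         if isinstance(it, dict):
--             p = str(it.get("path", "")).strip()
--             if p:
--                 paths.append(p)
--     # sort first; duplicates become adjacent, so no set is needed
--     paths.sort()
--     out = []
--     prev = None
--     for p in paths:
--         if p != prev:
--             out.append(p)
--             prev = p
--     return {"files": [{"path": p} for p in out]}
-- ===== Notes on version B (the rewrite author's own statement) =====
-- stated objective: idiomatic
-- what changed: B keeps no hash set: it collects the valid path strings in one filtering pass, sorts them first, and deduplicates by a single adjacent-comparison pass over the sorted list (duplicates are adjacent after sorting), wrapping into {"path": p} dicts only at the end; A wraps each path into a dict immediately, deduplicates with a seen-set preserving first occurrences, and sorts the dict records afterwards.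
import Mathlib
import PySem

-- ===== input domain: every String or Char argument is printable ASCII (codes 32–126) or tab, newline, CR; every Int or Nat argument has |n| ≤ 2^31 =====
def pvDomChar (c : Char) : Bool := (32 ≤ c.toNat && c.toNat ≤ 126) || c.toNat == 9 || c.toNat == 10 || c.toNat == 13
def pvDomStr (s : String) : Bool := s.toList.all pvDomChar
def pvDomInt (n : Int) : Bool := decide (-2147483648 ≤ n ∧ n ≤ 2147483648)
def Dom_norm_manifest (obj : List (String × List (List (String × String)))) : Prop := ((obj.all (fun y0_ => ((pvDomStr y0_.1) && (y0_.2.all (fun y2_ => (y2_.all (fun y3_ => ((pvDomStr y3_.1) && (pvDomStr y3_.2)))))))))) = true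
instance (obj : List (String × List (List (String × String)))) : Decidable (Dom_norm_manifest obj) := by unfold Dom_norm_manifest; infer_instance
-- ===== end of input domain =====

-- B deduplicates by sorting the plain path strings first and dropping adjacent equals in one pass
-- (no seen-set, dicts built only at the end); same return value as A (idiomatic/alternative, not faster).

-- ===== PORT A =====
def norm_manifest (obj : List (String × List (List (String × String)))) : List (String × List (List (String × String))) :=
  let files := (PySem.Dict.mk obj).getD "files" []
  -- 'isinstance(it, dict)' is always true under the type convention (every item IS an assoc list)
  let norm := files.foldl (fun acc it =>
      let p := PySem.Str.strip ((PySem.Dict.mk it).getD "path" "")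
      if p ≠ "" then acc ++ [[("path", p)]] else acc)
    ([] : List (List (String × String)))
  -- it["path"] cannot raise: every element of norm carries the key "path" (ported as getD)
  let su := norm.foldl (fun (su : PySem.Set String × List (List (String × String))) it =>
      if ¬ ((PySem.Dict.mk it).getD "path" "" ∈ su.1) then
        (PySem.Set.add su.1 ((PySem.Dict.mk it).getD "path" ""), su.2 ++ [it])
      else su)
    (PySem.Set.empty, [])
  let uniq := PySem.List.sorted su.2 (fun x => (PySem.Dict.mk x).getD "path" "") false
  [("files", uniq)]

-- ===== PORT B =====
def norm_manifest_alt (obj : List (String × List (List (String × String)))) : List (String × List (List (String × String))) :=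
  let paths := ((PySem.Dict.mk obj).getD "files" []).foldl (fun acc it =>
      let p := PySem.Str.strip ((PySem.Dict.mk it).getD "path" "")
      if p ≠ "" then acc ++ [p] else acc)
    ([] : List String)
  let sortedPaths := PySem.List.sorted paths (fun x => x) false
  let st := sortedPaths.foldl (fun (st : List String × Option String) p =>
      if st.2 ≠ some p then (st.1 ++ [p], some p) else st)
    (([] : List String), (none : Option String))
  [("files", st.1.map (fun p => [("path", p)]))]

-- ===== PRECONDITION & SPEC =====
def Spec_norm_manifest (obj : List (String × List (List (String × String)))) (out : List (String × List (List (String × String)))) : Prop := out = norm_manifest_alt obj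
instance (obj : List (String × List (List (String × String)))) (out : List (String × List (List (String × String)))) : Decidable (Spec_norm_manifest obj out) := by unfold Spec_norm_manifest; infer_instance

-- ===== CLAIM (what is proved, stated in full; the proofs are below) =====
def Claim_equal_norm_manifest : Prop := ∀ (obj : List (String × List (List (String × String)))), Dom_norm_manifest obj → Spec_norm_manifest obj (norm_manifest obj)

-- ===== LEMMAS AND PROOFS =====

-- wrap a path string into the singleton dict record {"path": p}
def pvWrap (p : String) : List (String × String) := [("path", p)]

-- A's seen-set loop, on the underlying strings
def pvSDedup (s : PySem.Set String) : List String → List String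
  | [] => []
  | p :: r => if p ∈ s then pvSDedup s r else p :: pvSDedup (PySem.Set.add s p) r

-- B's adjacent-dedup loop as a structural recursion
def pvAdj (prev : Option String) : List String → List String
  | [] => []
  | p :: r => if prev ≠ some p then p :: pvAdj (some p) r else pvAdj (some p) r

theorem pvWrap_key (p : String) : (PySem.Dict.mk (pvWrap p)).getD "path" "" = p := rfl

theorem pvFoldA (ps : List String) : ∀ (s : PySem.Set String) (u : List (List (String × String))),
    ((ps.map pvWrap).foldl (fun (su : PySem.Set String × List (List (String × String))) it =>
      if ¬ ((PySem.Dict.mk it).getD "path" "" ∈ su.1) then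
        (PySem.Set.add su.1 ((PySem.Dict.mk it).getD "path" ""), su.2 ++ [it])
      else su) (s, u)).2 = u ++ (pvSDedup s ps).map pvWrap := by
  induction ps with
  | nil => intro s u; simp [pvSDedup]
  | cons p r ih =>
    intro s u
    simp only [List.map_cons, List.foldl_cons, pvWrap_key, pvSDedup]
    by_cases h : p ∈ s
    · rw [if_neg (not_not_intro h), if_pos h]
      exact ih s u
    · rw [if_pos h, if_neg h, ih (PySem.Set.add s p) (u ++ [pvWrap p])]
      simp [pvWrap]
theorem pvMem_sdedup (ps : List String) : ∀ (s : PySem.Set String) (x : String),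
    x ∈ pvSDedup s ps ↔ x ∈ ps ∧ x ∉ s := by
  induction ps with
  | nil => intro s x; simp [pvSDedup]
  | cons p r ih =>
    intro s x
    simp only [pvSDedup]
    by_cases h : p ∈ s
    · simp only [if_pos h, ih, List.mem_cons]
      constructor
      · rintro ⟨hx, hns⟩; exact ⟨Or.inr hx, hns⟩
      · rintro ⟨hx | hx, hns⟩
        · exact absurd (hx ▸ h) hns
        · exact ⟨hx, hns⟩
    · simp only [if_neg h, List.mem_cons, ih, PySem.Set.mem_add]
      constructor
      · rintro (rfl | ⟨hx, hns⟩)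
        · exact ⟨Or.inl rfl, h⟩
        · exact ⟨Or.inr hx, fun hm => hns (Or.inl hm)⟩
      · rintro ⟨hx | hx, hns⟩
        · exact Or.inl hx
        · by_cases hxp : x = p
          · exact Or.inl hxp
          · exact Or.inr ⟨hx, by simp [hns, hxp]⟩
theorem pvNodup_sdedup (ps : List String) : ∀ (s : PySem.Set String), (pvSDedup s ps).Nodup := by
  induction ps with
  | nil => intro s; simp [pvSDedup]
  | cons p r ih =>
    intro s
    simp only [pvSDedup]
    by_cases h : p ∈ s
    · simp [h, ih]
    · simp only [if_neg h, List.nodup_cons]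
      refine ⟨fun hm => ?_, ih _⟩
      have := (pvMem_sdedup r _ p).mp hm
      simp [PySem.Set.mem_add] at this
theorem pvFoldB (l : List String) : ∀ (prev : Option String) (acc : List String),
    (l.foldl (fun (st : List String × Option String) p =>
      if st.2 ≠ some p then (st.1 ++ [p], some p) else st) (acc, prev)).1
    = acc ++ pvAdj prev l := by
  induction l with
  | nil => intro prev acc; simp [pvAdj]
  | cons p r ih =>
    intro prev acc
    simp only [List.foldl_cons, pvAdj]
    by_cases h : prev = some p
    · rw [if_neg (not_not_intro h), if_neg (not_not_intro h), h]
      exact ih (some p) acc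
    · rw [if_pos h, if_pos h, ih (some p) (acc ++ [p])]
      simp
theorem pvAdj_spec (l : List String) : ∀ (prev : Option String),
    l.Pairwise (· ≤ ·) → (∀ x ∈ l, ∀ q, prev = some q → q ≤ x) →
    (∀ x, x ∈ pvAdj prev l ↔ x ∈ l ∧ prev ≠ some x) ∧ (pvAdj prev l).Pairwise (· < ·) := by
  induction l with
  | nil => intro prev _ _; simp [pvAdj]
  | cons p r ih =>
    intro prev hpw hlb
    have hpw' := List.pairwise_cons.mp hpw
    have hrec := ih (some p) hpw'.2 (fun x hx q hq => by cases hq; exact hpw'.1 x hx)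
    by_cases h : prev = some p
    · subst h
      have he : pvAdj (some p) (p :: r) = pvAdj (some p) r := by simp [pvAdj]
      rw [he]
      refine ⟨fun x => ?_, hrec.2⟩
      rw [hrec.1 x]
      constructor
      · rintro ⟨hx, hne⟩
        exact ⟨List.mem_cons_of_mem _ hx, hne⟩
      · rintro ⟨hx, hne⟩
        rcases List.mem_cons.mp hx with rfl | hx'
        · exact (hne rfl).elim
        · exact ⟨hx', hne⟩
    · have he : pvAdj prev (p :: r) = p :: pvAdj (some p) r := by simp [pvAdj, h]
      rw [he]
      refine ⟨fun x => ⟨?_, ?_⟩, ?_⟩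
      · intro hx
        rcases List.mem_cons.mp hx with rfl | hx'
        · exact ⟨List.mem_cons_self .., fun hc => h hc⟩
        · obtain ⟨hxr, hne⟩ := (hrec.1 x).mp hx'
          refine ⟨List.mem_cons_of_mem _ hxr, fun hc => ?_⟩
          rcases prev with _ | q
          · cases hc
          · have hq : q = x := Option.some.inj hc
            have h1 : q ≤ p := hlb p (List.mem_cons_self ..) q rfl
            have h2 : p ≤ q := hpw'.1 q (hq ▸ hxr)
            exact h (congrArg some (le_antisymm h1 h2))
      · rintro ⟨hx, hne⟩
        rcases List.mem_cons.mp hx with rfl | hx'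
        · exact List.mem_cons_self ..
        · by_cases hxp : x = p
          · subst hxp; exact List.mem_cons_self ..
          · exact List.mem_cons_of_mem _ ((hrec.1 x).mpr ⟨hx', fun hc => hxp (Option.some.inj hc).symm⟩)
      · rw [List.pairwise_cons]
        refine ⟨fun y hy => ?_, hrec.2⟩
        obtain ⟨hyr, hne⟩ := (hrec.1 y).mp hy
        exact lt_of_le_of_ne (hpw'.1 y hyr) (fun hpy => hne (congrArg _ hpy))

-- ===== VERDICT (by name: the statement is the Claim_ definition above) =====
theorem norm_manifest_spec : Claim_equal_norm_manifest := by
  intro obj _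
  unfold Spec_norm_manifest norm_manifest norm_manifest_alt
  simp only [PySem.List.foldl_append_ite (p := fun it => PySem.Str.strip ((PySem.Dict.mk it).getD "path" "") ≠ "")
      (f := fun it => [("path", PySem.Str.strip ((PySem.Dict.mk it).getD "path" ""))]),
    PySem.List.foldl_append_ite (p := fun it => PySem.Str.strip ((PySem.Dict.mk it).getD "path" "") ≠ "")
      (f := fun it => PySem.Str.strip ((PySem.Dict.mk it).getD "path" "")), List.nil_append]
  set files := (PySem.Dict.mk obj).getD "files" [] with hfiles
  set ps := (files.filter (fun it => decide (PySem.Str.strip ((PySem.Dict.mk it).getD "path" "") ≠ ""))).map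
      (fun it => PySem.Str.strip ((PySem.Dict.mk it).getD "path" "")) with hps
  have hmap : (files.filter (fun it => decide (PySem.Str.strip ((PySem.Dict.mk it).getD "path" "") ≠ ""))).map
      (fun it => [("path", PySem.Str.strip ((PySem.Dict.mk it).getD "path" ""))]) = ps.map pvWrap := by
    rw [hps, List.map_map]; rfl
  rw [hmap, pvFoldA, List.nil_append, pvFoldB, List.nil_append]
  set L := PySem.List.sorted ps (fun x => x) false with hL
  have hLpw : L.Pairwise (· ≤ ·) := PySem.List.sorted_pairwise ps (fun x => x) 
  have hadj := pvAdj_spec L none hLpw (by simp)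
  have hmemL : ∀ x, x ∈ pvAdj none L ↔ x ∈ ps := by
    intro x; rw [(hadj.1 x)]; simp [hL, PySem.List.mem_sorted]
  have hperm : (pvAdj none L).Perm (pvSDedup PySem.Set.empty ps) := by
    rw [List.perm_ext_iff_of_nodup (hadj.2.imp ne_of_lt) (pvNodup_sdedup ps _)]
    intro a
    rw [hmemL a, pvMem_sdedup]
    simp [PySem.Set.empty]
  have := PySem.List.sorted_eq_of_perm_of_pairwise_lt
    (xs := (pvSDedup PySem.Set.empty ps).map pvWrap) (ys := (pvAdj none L).map pvWrap)
    (key := fun x => (PySem.Dict.mk x).getD "path" "")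
    (by exact hperm.map pvWrap)
    (by rw [List.pairwise_map]; simpa [pvWrap_key] using hadj.2)
  rw [this]
  rfl
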